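-- pv_equiv track=rewrite | github.com/chaeeun15/Algorithm | 프로그래머스/2/42587. 프로세스/프로세스.py | solution
-- ===== SOURCE A (Python) =====
-- from collections import deque
--
-- def solution(priorities, location):
--     answer = 0
--     queue = deque([i for i in range(len(priorities))])
--     cur_priorities = priorities[:]
--
--     while queue:
--         cur = queue.popleft()
--         # 만약 현재 꺼내진 프로세스의 우선순위가 가장 높다면
--         # 큐에 다시넣지 않고 실행 횟수 증가
--         if priorities[cur] == max(cur_priorities):
--             answer += 1
--             cur_priorities.remove(priorities[cur])
--             # 만약 지금 실행된 프로세스가 원하는 location의 프로세스라면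
--             # 실행 횟수 리턴
--             if cur == location:
--                 return answer
--         # 지금 꺼내진 프로세스보다 높은 우선 순위를 가진 다른 프로세스가 있다면
--         # 다시 큐에 넣음
--         else:
--             queue.append(cur)
--     return answer
-- ===== SOURCE B (Python) =====
-- def solution(priorities, location):
--     groups = {}
--     for i, p in enumerate(priorities):
--         groups.setdefault(p, []).append(i)
--     answer = 0
--     start = 0
--     for p in sorted(groups, reverse=True):
--         g = groups[p]
--         for i in [j for j in g if j >= start] + [j for j in g if j < start]:
--             answer += 1
--             if i == location:
--                 return answer
--             start = i + 1
--     return answer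
-- ===== Notes on version B (the rewrite author's own statement) =====
-- stated objective: faster
-- what changed: B replaces A's rotating-queue simulation (which rescans max() and does a list.remove() at every pop) by a closed form: it buckets the indices by priority in one dict pass, then walks the priority levels in descending sorted order, emitting each level's bucket in cyclic index order starting after the previously executed index.
import Mathlib
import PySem

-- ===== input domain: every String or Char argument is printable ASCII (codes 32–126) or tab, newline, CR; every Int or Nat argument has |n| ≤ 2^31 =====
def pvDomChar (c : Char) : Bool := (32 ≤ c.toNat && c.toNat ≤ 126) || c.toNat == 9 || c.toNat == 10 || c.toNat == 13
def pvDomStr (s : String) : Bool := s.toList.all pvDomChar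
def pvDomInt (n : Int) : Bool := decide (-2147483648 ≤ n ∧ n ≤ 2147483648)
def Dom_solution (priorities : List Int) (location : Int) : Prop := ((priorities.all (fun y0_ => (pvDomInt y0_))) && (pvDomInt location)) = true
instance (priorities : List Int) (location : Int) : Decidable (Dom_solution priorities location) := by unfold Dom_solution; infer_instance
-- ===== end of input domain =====

-- B drops A's rotating queue simulation (per-pop max() rescan and remove()) for a
-- level-by-level closed form: group indices by priority once, then walk the priority
-- levels in descending order, each group in cyclic index order from the last executed
-- position (objective: faster, asymptotic).

-- ===== PORT A =====
-- while-loop of A with fuel ((n+1)^2 bounds the iteration count; a totality guard,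
-- never reached). pyGetD/.getD defaults sit at unreachable spots: every queue element
-- is an in-range index and cur_priorities is nonempty while the queue is.
def solutionLoopA (priorities : List Int) (location : Int) :
    Nat → List Int → List Int → Int → Int
  | 0, _, _, answer => answer
  | _ + 1, [], _, answer => answer
  | fuel + 1, cur :: rest, curPr, answer =>
    if PySem.List.pyGetD priorities cur 0 = (PySem.List.max? curPr (fun x => x)).getD 0 then
      let curPr' := (PySem.List.remove? curPr (PySem.List.pyGetD priorities cur 0)).getD curPr
      if cur = location then answer + 1
      else solutionLoopA priorities location fuel rest curPr' (answer + 1)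
    else solutionLoopA priorities location fuel (rest ++ [cur]) curPr answer

def solution (priorities : List Int) (location : Int) : Int :=
  solutionLoopA priorities location ((priorities.length + 1) * (priorities.length + 1))
    (PySem.List.pyRange 0 priorities.length 1) priorities 0

-- ===== PORT B =====
-- groups.setdefault(p, []).append(i) over enumerate(priorities)
def buildGroups (priorities : List Int) : PySem.Dict Int (List Int) :=
  (PySem.List.enumerate priorities).foldl
    (fun d ip => d.modify ip.2 [] (fun g => g ++ [ip.1])) PySem.Dict.empty

-- the inner 'for i in cyc' loop: Sum.inl = early return, Sum.inr = (answer, start) carried on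
def runGroup (location : Int) : List Int → Int → Int → Sum Int (Int × Int)
  | [], answer, start => Sum.inr (answer, start)
  | i :: rest, answer, _start =>
    if i = location then Sum.inl (answer + 1)
    else runGroup location rest (answer + 1) (i + 1)

-- the outer 'for p in sorted(groups, reverse=True)' loop
def runLevels (location : Int) (groups : PySem.Dict Int (List Int)) :
    List Int → Int → Int → Int
  | [], answer, _ => answer
  | p :: rest, answer, start =>
    let g := groups.getD p []
    let cyc := g.filter (fun j => decide (start ≤ j)) ++ g.filter (fun j => decide (j < start))
    match runGroup location cyc answer start with
    | .inl a => a
    | .inr (a, s) => runLevels location groups rest a s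

def solution_alt (priorities : List Int) (location : Int) : Int :=
  let groups := buildGroups priorities
  runLevels location groups (PySem.List.sorted groups.keys (fun x => x) true) 0 0

-- ===== PRECONDITION & SPEC =====
def Spec_solution (priorities : List Int) (location : Int) (out : Int) : Prop := out = solution_alt priorities location
instance (priorities : List Int) (location : Int) (out : Int) : Decidable (Spec_solution priorities location out) := by unfold Spec_solution; infer_instance

-- ===== CLAIM (what is proved, stated in full; the proofs are below) =====
def Claim_equal_solution : Prop := ∀ (priorities : List Int) (location : Int), Dom_solution priorities location → Spec_solution priorities location (solution priorities location)

-- ===== LEMMAS AND PROOFS =====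

def rotQ (L : List Int) (s : Int) : List Int :=
  L.filter (fun j => decide (s ≤ j)) ++ L.filter (fun j => decide (j < s))

def grp (priorities R : List Int) (p : Int) : List Int :=
  R.filter (fun j => decide (PySem.List.pyGetD priorities j 0 = p))

theorem splitLt (R : List Int) (hR : R.Pairwise (· < ·)) (b : Int) :
    R = R.filter (fun j => decide (j < b)) ++ R.filter (fun j => decide (b ≤ j)) := by
  induction R with
  | nil => rfl
  | cons x t ih =>
    rcases List.pairwise_cons.mp hR with ⟨hx, ht⟩
    by_cases hxb : x < b
    · simp only [List.filter_cons, decide_eq_true_eq]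
      rw [if_pos hxb, if_neg (by omega), List.cons_append]
      exact congrArg (x :: ·) (ih ht)
    · push Not at hxb
      have h1 : t.filter (fun j => decide (j < b)) = [] := by
        apply List.filter_eq_nil_iff.mpr
        intro y hy
        have := hx y hy
        simp only [decide_eq_true_eq]
        omega
      have h2 : List.filter (fun j => decide (b ≤ j)) (x :: t) = x :: t := by
        apply List.filter_eq_self.mpr
        intro y hy
        rcases List.mem_cons.mp hy with rfl | hy
        · simpa using hxb
        · have := hx y hy; simp only [decide_eq_true_eq]; omega
      simp only [List.filter_cons, decide_eq_true_eq] at h2 ⊢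
      rw [if_neg (by omega), h1, h2]
      rfl

theorem splitMem (R : List Int) (hR : R.Pairwise (· < ·)) (i : Int) (hi : i ∈ R) :
    R = R.filter (fun j => decide (j < i)) ++ i :: R.filter (fun j => decide (i < j)) := by
  induction R with
  | nil => cases hi
  | cons x t ih =>
    rcases List.pairwise_cons.mp hR with ⟨hx, ht⟩
    rcases List.mem_cons.mp hi with rfl | hit
    · have h1 : List.filter (fun j => decide (j < i)) (i :: t) = [] := by
        apply List.filter_eq_nil_iff.mpr
        intro y hy
        rcases List.mem_cons.mp hy with rfl | hy
        · simp
        · have := hx y hy; simp only [decide_eq_true_eq]; omega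
      have h2 : t.filter (fun j => decide (i < j)) = t := by
        apply List.filter_eq_self.mpr
        intro y hy; simpa using hx y hy
      rw [h1, List.nil_append, List.filter_cons, if_neg (by simp), h2]
    · have hxi : x < i := hx i hit
      simp only [List.filter_cons, decide_eq_true_eq]
      rw [if_pos (by simpa using hxi), if_neg (by omega)]
      have := ih ht hit
      rw [List.cons_append]
      exact congrArg (x :: ·) this

-- rotating the queue: elements whose priority is not the current max go to the back
theorem rotateA (priorities : List Int) (location : Int) (curPr : List Int) (m : Int)
    (hmax : PySem.List.max? curPr (fun x => x) = some m) :
    ∀ (q1 q2 : List Int), (∀ j ∈ q1, PySem.List.pyGetD priorities j 0 ≠ m) →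
    ∀ (fuel : Nat) (ans : Int),
      solutionLoopA priorities location (fuel + q1.length) (q1 ++ q2) curPr ans =
      solutionLoopA priorities location fuel (q2 ++ q1) curPr ans := by
  intro q1
  induction q1 with
  | nil => intro q2 _ fuel ans; simp
  | cons j t ih =>
    intro q2 hq1 fuel ans
    have hne : PySem.List.pyGetD priorities j 0 ≠ m := hq1 j (by simp)
    have : fuel + (j :: t).length = (fuel + t.length) + 1 := by simp; omega
    rw [this]
    show solutionLoopA priorities location ((fuel + t.length) + 1) (j :: (t ++ q2)) curPr ans = _
    rw [solutionLoopA]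
    rw [if_neg (by rw [hmax]; simpa using hne)]
    have := ih (q2 ++ [j]) (fun x hx => hq1 x (by simp [hx])) fuel ans
    calc solutionLoopA priorities location (fuel + t.length) (t ++ q2 ++ [j]) curPr ans
        = solutionLoopA priorities location (fuel + t.length) (t ++ (q2 ++ [j])) curPr ans := by
          rw [List.append_assoc]
      _ = solutionLoopA priorities location fuel (q2 ++ [j] ++ t) curPr ans := this
      _ = solutionLoopA priorities location fuel (q2 ++ (j :: t)) curPr ans := by
          rw [List.append_assoc]; rfl

-- the crux: popping the cyclically-first P-element i from the rotated queue leaves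
-- exactly the queue rotated at i+1 over R.erase i
theorem rot_step (R : List Int) (hR : R.Pairwise (· < ·)) (P : Int → Bool) (s i : Int)
    (hi : i ∈ R) (hP : P i = true)
    (hfirst : (s ≤ i ∧ ∀ j ∈ R, P j = true → s ≤ j → i ≤ j) ∨
              ((∀ j ∈ R, P j = true → j < s) ∧ ∀ j ∈ R, P j = true → i ≤ j)) :
    ∃ q1 q2, rotQ R s = q1 ++ i :: q2 ∧ (∀ x ∈ q1, ¬ P x = true) ∧
      q2 ++ q1 = rotQ (R.erase i) (i + 1) := by
  have hnd : R.Nodup := hR.imp (fun h => ne_of_lt h)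
  have herase : R.erase i = R.filter (fun j => decide (j ≠ i)) := by
    rw [List.Nodup.erase_eq_filter hnd]
    exact List.filter_congr (fun x _ => by rw [Bool.eq_iff_iff]; simp only [bne_iff_ne, decide_eq_true_eq, ne_eq])
  have hgt : (R.erase i).filter (fun j => decide (i + 1 ≤ j)) = R.filter (fun j => decide (i < j)) := by
    rw [herase, List.filter_filter]
    exact List.filter_congr (fun x _ => by rw [Bool.eq_iff_iff]; simp only [Bool.and_eq_true, decide_eq_true_eq]; all_goals omega)
  have hlt : (R.erase i).filter (fun j => decide (j < i + 1)) = R.filter (fun j => decide (j < i)) := by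
    rw [herase, List.filter_filter]
    exact List.filter_congr (fun x _ => by rw [Bool.eq_iff_iff]; simp only [Bool.and_eq_true, decide_eq_true_eq]; all_goals omega)
  rcases hfirst with ⟨hsi, hmin⟩ | ⟨hall, hmin⟩
  · -- i is the least P-element ≥ s (and s ≤ i)
    refine ⟨R.filter (fun j => decide (s ≤ j ∧ j < i)),
            R.filter (fun j => decide (i < j)) ++ R.filter (fun j => decide (j < s)), ?_, ?_, ?_⟩
    · -- rotQ R s = q1 ++ i :: q2
      have hsub : (R.filter (fun j => decide (s ≤ j))).Pairwise (· < ·) :=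
        hR.sublist List.filter_sublist
      have himem : i ∈ R.filter (fun j => decide (s ≤ j)) := by
        simp only [List.mem_filter, decide_eq_true_eq]; exact ⟨hi, hsi⟩
      have := splitMem _ hsub i himem
      rw [List.filter_filter, List.filter_filter] at this
      have e1 : (R.filter (fun j => decide (j < i) && decide (s ≤ j))) =
          R.filter (fun j => decide (s ≤ j ∧ j < i)) :=
        List.filter_congr (fun x _ => by rw [Bool.eq_iff_iff]; simp only [Bool.and_eq_true, decide_eq_true_eq]; all_goals omega)
      have e2 : (R.filter (fun j => decide (i < j) && decide (s ≤ j))) =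
          R.filter (fun j => decide (i < j)) :=
        List.filter_congr (fun x _ => by rw [Bool.eq_iff_iff]; simp only [Bool.and_eq_true, decide_eq_true_eq]; all_goals omega)
      rw [e1, e2] at this
      show R.filter (fun j => decide (s ≤ j)) ++ R.filter (fun j => decide (j < s)) = _
      rw [this, List.append_assoc, List.cons_append]
    · intro x hx
      simp only [List.mem_filter, decide_eq_true_eq] at hx
      intro hPx
      have := hmin x hx.1 hPx hx.2.1
      omega
    · -- q2 ++ q1 = rotQ (R.erase i) (i+1)
      show _ = (R.erase i).filter (fun j => decide (i + 1 ≤ j)) ++ (R.erase i).filter (fun j => decide (j < i + 1))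
      rw [hgt, hlt, List.append_assoc]
      congr 1
      have hsub : (R.filter (fun j => decide (j < i))).Pairwise (· < ·) :=
        hR.sublist List.filter_sublist
      have := splitLt _ hsub s
      rw [List.filter_filter, List.filter_filter] at this
      have e1 : (R.filter (fun j => decide (j < s) && decide (j < i))) =
          R.filter (fun j => decide (j < s)) :=
        List.filter_congr (fun x _ => by rw [Bool.eq_iff_iff]; simp only [Bool.and_eq_true, decide_eq_true_eq]; all_goals omega)
      have e2 : (R.filter (fun j => decide (s ≤ j) && decide (j < i))) =
          R.filter (fun j => decide (s ≤ j ∧ j < i)) :=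
        List.filter_congr (fun x _ => by rw [Bool.eq_iff_iff]; simp only [Bool.and_eq_true, decide_eq_true_eq])
      rw [e1, e2] at this
      exact this.symm
  · -- all P-elements are < s; i is the least P-element
    have his : i < s := hall i hi hP
    refine ⟨R.filter (fun j => decide (s ≤ j)) ++ R.filter (fun j => decide (j < i)),
            R.filter (fun j => decide (i < j ∧ j < s)), ?_, ?_, ?_⟩
    · have hsub : (R.filter (fun j => decide (j < s))).Pairwise (· < ·) :=
        hR.sublist List.filter_sublist
      have himem : i ∈ R.filter (fun j => decide (j < s)) := by
        simp only [List.mem_filter, decide_eq_true_eq]; exact ⟨hi, his⟩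
      have := splitMem _ hsub i himem
      rw [List.filter_filter, List.filter_filter] at this
      have e1 : (R.filter (fun j => decide (j < i) && decide (j < s))) =
          R.filter (fun j => decide (j < i)) :=
        List.filter_congr (fun x _ => by rw [Bool.eq_iff_iff]; simp only [Bool.and_eq_true, decide_eq_true_eq]; all_goals omega)
      have e2 : (R.filter (fun j => decide (i < j) && decide (j < s))) =
          R.filter (fun j => decide (i < j ∧ j < s)) :=
        List.filter_congr (fun x _ => by rw [Bool.eq_iff_iff]; simp only [Bool.and_eq_true, decide_eq_true_eq])
      rw [e1, e2] at this
      show R.filter (fun j => decide (s ≤ j)) ++ R.filter (fun j => decide (j < s)) = _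
      rw [this, List.append_assoc]
    · intro x hx hPx
      rcases List.mem_append.mp hx with hx | hx <;>
        simp only [List.mem_filter, decide_eq_true_eq] at hx
      · have := hall x hx.1 hPx; omega
      · have := hmin x hx.1 hPx; omega
    · show _ = (R.erase i).filter (fun j => decide (i + 1 ≤ j)) ++ (R.erase i).filter (fun j => decide (j < i + 1))
      rw [hgt, hlt]
      rw [← List.append_assoc]
      congr 1
      have hsub : (R.filter (fun j => decide (i < j))).Pairwise (· < ·) :=
        hR.sublist List.filter_sublist
      have := splitLt _ hsub s
      rw [List.filter_filter, List.filter_filter] at this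
      have e1 : (R.filter (fun j => decide (j < s) && decide (i < j))) =
          R.filter (fun j => decide (i < j ∧ j < s)) :=
        List.filter_congr (fun x _ => by rw [Bool.eq_iff_iff]; simp only [Bool.and_eq_true, decide_eq_true_eq]; all_goals omega)
      have e2 : (R.filter (fun j => decide (s ≤ j) && decide (i < j))) =
          R.filter (fun j => decide (s ≤ j)) :=
        List.filter_congr (fun x _ => by rw [Bool.eq_iff_iff]; simp only [Bool.and_eq_true, decide_eq_true_eq]; all_goals omega)
      rw [e1, e2] at this
      exact this.symm

-- head of a rotated sorted list is the cyclically-first element from s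
theorem cycHead (G : List Int) (hG : G.Pairwise (· < ·)) (s i : Int) (t : List Int)
    (h : rotQ G s = i :: t) :
    i ∈ G ∧ ((s ≤ i ∧ ∀ j ∈ G, s ≤ j → i ≤ j) ∨
             ((∀ j ∈ G, j < s) ∧ ∀ j ∈ G, i ≤ j)) := by
  unfold rotQ at h
  cases hge : G.filter (fun j => decide (s ≤ j)) with
  | cons x u =>
    rw [hge] at h
    injection h with h1 h2
    rw [h1] at hge
    have himem : i ∈ G.filter (fun j => decide (s ≤ j)) := by rw [hge]; simp
    simp only [List.mem_filter, decide_eq_true_eq] at himem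
    refine ⟨himem.1, Or.inl ⟨himem.2, ?_⟩⟩
    intro j hj hsj
    have hjmem : j ∈ G.filter (fun j => decide (s ≤ j)) := by
      simp only [List.mem_filter, decide_eq_true_eq]; exact ⟨hj, hsj⟩
    rw [hge] at hjmem
    have hsub : (G.filter (fun j => decide (s ≤ j))).Pairwise (· < ·) :=
      hG.sublist List.filter_sublist
    rw [hge] at hsub
    rcases List.mem_cons.mp hjmem with rfl | hj' 
    · omega
    · exact le_of_lt ((List.pairwise_cons.mp hsub).1 j hj')
  | nil =>
    rw [hge, List.nil_append] at h
    have hall : ∀ j ∈ G, j < s := by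
      intro j hj
      by_contra hc
      have : j ∈ G.filter (fun j => decide (s ≤ j)) := by
        simp only [List.mem_filter, decide_eq_true_eq]; exact ⟨hj, by omega⟩
      rw [hge] at this; cases this
    have hfe : G.filter (fun j => decide (j < s)) = G :=
      List.filter_eq_self.mpr (fun y hy => by simpa using hall y hy)
    rw [hfe] at h
    subst h
    refine ⟨by simp, Or.inr ⟨hall, ?_⟩⟩
    intro j hj
    rcases List.mem_cons.mp hj with rfl | hj'
    · omega
    · exact le_of_lt ((List.pairwise_cons.mp hG).1 j hj')

-- B's continuation: what runLevels does from mid-level state (levels, cycRem, ans, s)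
def cont (location : Int) (groups : PySem.Dict Int (List Int))
    (levels cycRem : List Int) (ans s : Int) : Int :=
  match levels with
  | [] => ans
  | _ :: rest =>
    match runGroup location cycRem ans s with
    | .inl a => a
    | .inr (a, s') => runLevels location groups rest a s'

theorem runLevels_eq_cont (location : Int) (groups : PySem.Dict Int (List Int))
    (p : Int) (rest : List Int) (ans s : Int) :
    runLevels location groups (p :: rest) ans s =
      cont location groups (p :: rest) (rotQ (groups.getD p []) s) ans s := rfl

theorem foldl_groups (l : List (Int × Int)) (d : PySem.Dict Int (List Int)) (p : Int) :
    (l.foldl (fun d ip => d.modify ip.2 [] (fun g => g ++ [ip.1])) d).getD p [] =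
      d.getD p [] ++ (l.filter (fun ip => decide (ip.2 = p))).map Prod.fst := by
  induction l generalizing d with
  | nil => simp
  | cons x t ih =>
    rw [List.foldl_cons, ih, PySem.Dict.getD_modify, List.filter_cons]
    by_cases hx : x.2 = p
    · rw [if_pos hx.symm, if_pos (by simpa using hx), hx]
      simp
    · rw [if_neg (fun h => hx h.symm), if_neg (by simpa using hx)]

theorem getD_buildGroups (priorities : List Int) (p : Int) :
    (buildGroups priorities).getD p [] =
      (PySem.List.pyRange 0 priorities.length 1).filter
        (fun j => decide (PySem.List.pyGetD priorities j 0 = p)) := by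
  unfold buildGroups
  rw [foldl_groups]
  have he : PySem.List.enumerate priorities =
      (PySem.List.pyRange 0 priorities.length 1).map
        (fun j => (j, PySem.List.pyGetD priorities j 0)) :=
    PySem.List.enumerate_eq_map_pyRange priorities 0
  rw [he, List.filter_map, List.map_map]
  have : (PySem.Dict.empty : PySem.Dict Int (List Int)).getD p [] = [] := by
    simp [PySem.Dict.empty, PySem.Dict.getD, PySem.Dict.get?]
  rw [this, List.nil_append]
  have : (Prod.fst ∘ fun j => (j, PySem.List.pyGetD priorities j 0)) = id := rfl
  rw [this, List.map_id]
  rfl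

theorem keys_buildGroups (priorities : List Int) :
    (buildGroups priorities).keys = PySem.Set.ofList priorities := by
  unfold buildGroups
  rw [PySem.Dict.keys_foldl_modify_key (PySem.List.enumerate priorities) (fun ip => ip.2)
    [] (fun _ ip g => g ++ [ip.1]) PySem.Dict.empty]
  rw [PySem.List.map_snd_enumerate]
  rfl

theorem max_eq (curPr R : List Int) (priorities : List Int)
    (hperm : curPr.Perm (R.map (fun j => PySem.List.pyGetD priorities j 0))) (p : Int)
    (hub : ∀ j ∈ R, PySem.List.pyGetD priorities j 0 ≤ p)
    (hin : ∃ j ∈ R, PySem.List.pyGetD priorities j 0 = p) :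
    PySem.List.max? curPr (fun x => x) = some p := by
  obtain ⟨j0, hj0, hj0p⟩ := hin
  have hpmem : p ∈ curPr := by
    apply hperm.symm.subset
    rw [← hj0p]
    exact List.mem_map_of_mem hj0
  cases hmx : PySem.List.max? curPr (fun x => x) with
  | none =>
    rw [PySem.List.max?_eq_none_iff] at hmx
    rw [hmx] at hpmem; cases hpmem
  | some m =>
    have hmem := PySem.List.max?_mem hmx
    have hmax := PySem.List.max?_isMax hmx
    have h1 : p ≤ m := hmax p hpmem
    have h2 : m ≤ p := by
      have := hperm.subset hmem
      rcases List.mem_map.mp this with ⟨j, hj, rfl⟩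
      exact hub j hj
    rw [le_antisymm h2 h1]

theorem grp_erase (priorities R : List Int) (hR : R.Pairwise (· < ·)) (p i : Int) :
    grp priorities (R.erase i) p = (grp priorities R p).erase i := by
  have hnd : R.Nodup := hR.imp (fun h => ne_of_lt h)
  have hndg : (grp priorities R p).Nodup := hnd.filter _
  rw [List.Nodup.erase_eq_filter hnd, List.Nodup.erase_eq_filter hndg]
  unfold grp
  rw [List.filter_filter, List.filter_filter]
  exact List.filter_congr (fun x _ => by rw [Bool.and_comm])

theorem rotQ_perm (L : List Int) (s : Int) : (rotQ L s).Perm L := by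
  unfold rotQ
  have : L.filter (fun j => decide (j < s)) = L.filter (fun j => !decide (s ≤ j)) :=
    List.filter_congr (fun x _ => by rw [Bool.eq_iff_iff]; simp only [Bool.not_eq_eq_eq_not, Bool.not_true, decide_eq_false_iff_not, decide_eq_true_eq, not_le])
  rw [this]
  exact List.filter_append_perm _ _

theorem pyRange_len_pairwise (xs : List Int) :
    (PySem.List.pyRange 0 xs.length 1).Pairwise (· < ·) := by
  have h := PySem.List.pairwise_lt_enumerate (xs := xs) (s := 0)
  have h2 : ((PySem.List.enumerate xs 0).map Prod.fst).Pairwise (· < ·) :=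
    List.pairwise_map.mpr h
  rw [PySem.List.map_fst_enumerate, zero_add] at h2
  exact h2

theorem mainLoop (priorities : List Int) (location : Int) :
    ∀ (meas : Nat) (R levels cycRem : List Int) (s ans : Int) (curPr : List Int) (fuel : Nat),
    R.length + levels.length ≤ meas →
    R.Pairwise (· < ·) →
    (∀ j ∈ R, 0 ≤ j ∧ j < (priorities.length : Int)) →
    curPr.Perm (R.map (fun j => PySem.List.pyGetD priorities j 0)) →
    levels.Pairwise (· > ·) →
    (∀ j ∈ R, PySem.List.pyGetD priorities j 0 ∈ levels) →
    (match levels with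
     | [] => True
     | _ :: rest =>
       cycRem = rotQ (grp priorities R (levels.headI)) s ∧
       (∀ j : Int, 0 ≤ j → j < (priorities.length : Int) →
          PySem.List.pyGetD priorities j 0 ∈ rest → j ∈ R)) →
    (R.length + 1) * (R.length + 1) ≤ fuel →
    solutionLoopA priorities location fuel (rotQ R s) curPr ans =
      cont location (buildGroups priorities) levels cycRem ans s := by
  intro meas
  induction meas with
  | zero =>
    intro R levels cycRem s ans curPr fuel hm _ _ _ _ _ _ hf
    have hR0 : R = [] := List.length_eq_zero_iff.mp (by omega)
    have hl0 : levels = [] := List.length_eq_zero_iff.mp (by omega)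
    subst hR0; subst hl0
    obtain ⟨f, rfl⟩ : ∃ f, fuel = f + 1 := ⟨fuel - 1, by simp at hf; omega⟩
    rfl
  | succ meas ih =>
    intro R levels cycRem s ans curPr fuel hm hR hrange hperm hlev h5 hmatch hf
    cases levels with
    | nil =>
      have hR0 : R = [] := by
        cases hR0 : R with
        | nil => rfl
        | cons a t => exact absurd (h5 a (by rw [hR0]; simp)) (by simp)
      subst hR0
      obtain ⟨f, rfl⟩ : ∃ f, fuel = f + 1 := ⟨fuel - 1, by simp at hf; omega⟩
      rfl
    | cons p rest =>
      obtain ⟨hcyc, h7⟩ := hmatch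
      simp only [List.headI] at hcyc
      have hprest : ∀ q ∈ rest, q < p := (List.pairwise_cons.mp hlev).1
      have hrperm : (rotQ (grp priorities R p) s).Perm (grp priorities R p) :=
        rotQ_perm _ _
      cases hcy : cycRem with
      | nil =>
        -- level p is exhausted: move to the next level
        have hgrp0 : grp priorities R p = [] := by
          rw [hcy] at hcyc
          rw [← hcyc] at hrperm
          exact List.nil_perm.mp hrperm
        have h5' : ∀ j ∈ R, PySem.List.pyGetD priorities j 0 ∈ rest := by
          intro j hj
          rcases List.mem_cons.mp (h5 j hj) with hp | h
          · exfalso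
            have hjg : j ∈ grp priorities R p := by
              unfold grp
              rw [List.mem_filter]
              exact ⟨hj, by simpa using hp⟩
            rw [hgrp0] at hjg
            cases hjg
          · exact h
        have hcont : cont location (buildGroups priorities) (p :: rest) [] ans s =
            runLevels location (buildGroups priorities) rest ans s := rfl
        rw [hcont]
        cases rest with
        | nil =>
          have hR0 : R = [] := by
            cases hR0 : R with
            | nil => rfl
            | cons a tl => exact absurd (h5' a (by rw [hR0]; simp)) (by simp)
          subst hR0
          obtain ⟨f, rfl⟩ : ∃ f, fuel = f + 1 := ⟨fuel - 1, by simp at hf; omega⟩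
          rfl
        | cons p' rest' =>
          rw [runLevels_eq_cont]
          have hndR : R.Nodup := hR.imp (fun h => ne_of_lt h)
          have hgeq : (buildGroups priorities).getD p' [] = grp priorities R p' := by
            rw [getD_buildGroups]
            apply List.eq_of_perm_of_sorted (le := (· ≤ ·))
            · intro a b _ _ h1 h2; omega
            · exact ((pyRange_len_pairwise priorities).sublist List.filter_sublist).imp
                (fun h => le_of_lt h)
            · exact (hR.sublist List.filter_sublist).imp (fun h => le_of_lt h)
            · unfold grp
              rw [List.perm_ext_iff_of_nodup
                (((pyRange_len_pairwise priorities).imp (fun h => ne_of_lt h)).filter _)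
                (hndR.filter _)]
              intro a
              simp only [List.mem_filter, PySem.List.mem_pyRange_one, decide_eq_true_eq]
              constructor
              · rintro ⟨⟨h0, h1⟩, h2⟩
                exact ⟨h7 a h0 (by omega) (h2 ▸ List.mem_cons_self), h2⟩
              · rintro ⟨ha, h2⟩
                have := hrange a ha
                exact ⟨⟨this.1, by omega⟩, h2⟩
          rw [hgeq]
          refine ih R (p' :: rest') (rotQ (grp priorities R p') s) s ans curPr fuel
            (by simp at hm ⊢; omega) hR hrange hperm (List.pairwise_cons.mp hlev).2 h5'
            ⟨rfl, ?_⟩ hf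
          intro j h0 h1 h2
          exact h7 j h0 h1 (List.mem_cons_of_mem _ h2)
      | cons i t =>
        have hq : rotQ (grp priorities R p) s = i :: t := by rw [← hcyc, hcy]
        have hGpair : (grp priorities R p).Pairwise (· < ·) := hR.sublist List.filter_sublist
        obtain ⟨hiG, hfirstG⟩ := cycHead _ hGpair s i t hq
        have hiR : i ∈ R := (List.mem_filter.mp hiG).1
        have hpi : PySem.List.pyGetD priorities i 0 = p := by
          have := (List.mem_filter.mp hiG).2
          simpa using this
        have hub : ∀ j ∈ R, PySem.List.pyGetD priorities j 0 ≤ p := by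
          intro j hj
          rcases List.mem_cons.mp (h5 j hj) with h | h
          · exact le_of_eq h
          · exact le_of_lt (hprest _ h)
        have hmax := max_eq curPr R priorities hperm p hub ⟨i, hiR, hpi⟩
        have hfirstR : (s ≤ i ∧ ∀ j ∈ R,
              (fun j => decide (PySem.List.pyGetD priorities j 0 = p)) j = true → s ≤ j → i ≤ j) ∨
            ((∀ j ∈ R, (fun j => decide (PySem.List.pyGetD priorities j 0 = p)) j = true → j < s) ∧
              ∀ j ∈ R, (fun j => decide (PySem.List.pyGetD priorities j 0 = p)) j = true → i ≤ j) := by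
          rcases hfirstG with ⟨h1, h2⟩ | ⟨h1, h2⟩
          · exact Or.inl ⟨h1, fun j hj hPj hsj =>
              h2 j (List.mem_filter.mpr ⟨hj, hPj⟩) hsj⟩
          · exact Or.inr ⟨fun j hj hPj => h1 j (List.mem_filter.mpr ⟨hj, hPj⟩),
              fun j hj hPj => h2 j (List.mem_filter.mpr ⟨hj, hPj⟩)⟩
        obtain ⟨q1, q2, hQdec, hq1P, hq2q1⟩ :=
          rot_step R hR (fun j => decide (PySem.List.pyGetD priorities j 0 = p)) s i hiR
            (by simpa using hpi) hfirstR
        obtain ⟨g1, g2, hGdec, hg1, hg2⟩ :=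
          rot_step (grp priorities R p) hGpair (fun _ => true) s i hiG rfl
            (by rcases hfirstG with ⟨h1, h2⟩ | ⟨h1, h2⟩
                · exact Or.inl ⟨h1, fun j hj _ => h2 j hj⟩
                · exact Or.inr ⟨fun j hj _ => h1 j hj, fun j hj _ => h2 j hj⟩)
        have hg1nil : g1 = [] := by
          cases hg1c : g1 with
          | nil => rfl
          | cons a b => exact absurd rfl (hg1 a (by rw [hg1c]; simp))
        rw [hg1nil, List.nil_append] at hGdec
        rw [hg1nil, List.append_nil] at hg2
        have ht : t = rotQ ((grp priorities R p).erase i) (i + 1) := by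
          rw [hq] at hGdec
          injection hGdec with _ h2'
          rw [h2']
          exact hg2
        -- fuel arithmetic
        have hlenQ : q1.length + 1 + q2.length = R.length := by
          have := (rotQ_perm R s).length_eq
          rw [hQdec] at this
          simp at this
          omega
        have hRpos : 1 ≤ R.length := by omega
        have hlenE : (R.erase i).length = R.length - 1 := List.length_erase_of_mem hiR
        obtain ⟨f1, hfeq, hf1⟩ : ∃ f1, fuel = (f1 + 1) + q1.length ∧
            ((R.erase i).length + 1) * ((R.erase i).length + 1) ≤ f1 := by
          have hq1f : q1.length + 1 + (R.length * R.length) ≤ fuel := by nlinarith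
          refine ⟨fuel - q1.length - 1, by omega, ?_⟩
          rw [hlenE]
          have h1 : (R.length - 1 + 1) = R.length := by omega
          rw [h1]
          omega
        -- rotate the queue to the executed process
        rw [hQdec, hfeq]
        rw [rotateA priorities location curPr p hmax q1 (i :: q2)
          (fun j hj => by simpa using hq1P j hj) (f1 + 1) ans]
        show solutionLoopA priorities location (f1 + 1) (i :: (q2 ++ q1)) curPr ans = _
        rw [solutionLoopA]
        rw [if_pos (by rw [hmax, hpi]; rfl)]
        have hpmem : p ∈ curPr := by
          apply hperm.symm.subset
          rw [← hpi]
          exact List.mem_map_of_mem hiR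
        have hrem : (PySem.List.remove? curPr (PySem.List.pyGetD priorities i 0)).getD curPr =
            curPr.erase p := by
          rw [hpi, PySem.List.remove?_eq_some_erase curPr p hpmem, Option.getD_some]
        by_cases hloc : i = location
        · rw [if_pos hloc]
          show _ = cont location (buildGroups priorities) (p :: rest) (i :: t) ans s
          simp [cont, runGroup, hloc]
        · rw [if_neg hloc, hrem, hq2q1]
          have hperm' : (curPr.erase p).Perm
              ((R.erase i).map (fun j => PySem.List.pyGetD priorities j 0)) := by
            have h1 : R.Perm (i :: R.erase i) := List.perm_cons_erase hiR
            have h3 := (hperm.trans (h1.map (fun j => PySem.List.pyGetD priorities j 0))).erase p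
            rw [List.map_cons, hpi, List.erase_cons_head] at h3
            exact h3
          have hpnotrest : p ∉ rest := fun h => absurd (hprest p h) (lt_irrefl p)
          have := ih (R.erase i) (p :: rest) t (i + 1) (ans + 1) (curPr.erase p) f1
            (by simp at hm ⊢; omega)
            (hR.sublist (List.erase_sublist))
            (fun j hj => hrange j (List.mem_of_mem_erase hj))
            hperm'
            hlev
            (fun j hj => h5 j (List.mem_of_mem_erase hj))
            ⟨by simp only [List.headI]
                rw [ht, grp_erase priorities R hR p i],
             fun j h0 h1 h2 => by
                have hjR : j ∈ R := h7 j h0 h1 h2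
                have hji : j ≠ i := fun he => hpnotrest (by rw [← hpi, ← he]; exact h2)
                exact (List.mem_erase_of_ne hji).mpr hjR⟩
            hf1
          rw [this]
          show _ = cont location (buildGroups priorities) (p :: rest) (i :: t) ans s
          simp [cont, runGroup, hloc]

theorem solution_eq_alt (priorities : List Int) (location : Int) :
    solution priorities location = solution_alt priorities location := by
  unfold solution solution_alt
  show _ = runLevels location (buildGroups priorities)
      (PySem.List.sorted (buildGroups priorities).keys (fun x => x) true) 0 0
  have hkeys : (buildGroups priorities).keys = PySem.Set.ofList priorities :=
    keys_buildGroups priorities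
  rw [hkeys]
  have hpw : (PySem.List.pyRange 0 priorities.length 1).Pairwise (· < ·) :=
    pyRange_len_pairwise priorities
  have hrange : ∀ j ∈ PySem.List.pyRange 0 priorities.length 1,
      0 ≤ j ∧ j < (priorities.length : Int) := by
    intro j hj; exact PySem.List.mem_pyRange_one.mp hj
  have hlen : (PySem.List.pyRange 0 (priorities.length : Int) 1).length = priorities.length := by
    rw [PySem.List.length_pyRange_one]; simp
  have hperm : priorities.Perm
      ((PySem.List.pyRange 0 priorities.length 1).map
        (fun j => PySem.List.pyGetD priorities j 0)) := by
    have h := PySem.List.map_pyGetD_pyRange_zero priorities 0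
    have hlen2 : PySem.List.len priorities = (priorities.length : Int) := by
      simp [PySem.List.len]
    rw [hlen2] at h
    rw [h]
  have hrot : rotQ (PySem.List.pyRange 0 priorities.length 1) 0 =
      PySem.List.pyRange 0 priorities.length 1 := by
    unfold rotQ
    have h1 : (PySem.List.pyRange 0 (priorities.length : Int) 1).filter
        (fun j => decide ((0:Int) ≤ j)) = PySem.List.pyRange 0 priorities.length 1 :=
      List.filter_eq_self.mpr (fun y hy => by
        simp only [decide_eq_true_eq]
        exact (PySem.List.mem_pyRange_one.mp hy).1)
    have h2 : (PySem.List.pyRange 0 (priorities.length : Int) 1).filter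
        (fun j => decide (j < (0:Int))) = [] :=
      List.filter_eq_nil_iff.mpr (fun y hy => by
        have := (PySem.List.mem_pyRange_one.mp hy).1
        simp only [decide_eq_true_eq]
        omega)
    rw [h1, h2, List.append_nil]
  have hnd : (PySem.List.sorted (PySem.Set.ofList priorities) (fun x => x) true).Nodup :=
    ((PySem.List.sorted_perm (PySem.Set.ofList priorities) (fun x => x) true).nodup_iff).mpr
      (PySem.Set.nodup_ofList priorities)
  have hlev : (PySem.List.sorted (PySem.Set.ofList priorities) (fun x => x) true).Pairwise
      (· > ·) := by
    have h1 := PySem.List.sorted_pairwise_rev (PySem.Set.ofList priorities) (fun x => x)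
    exact (h1.and hnd).imp (fun h => lt_of_le_of_ne h.1 (fun he => h.2 he.symm))
  have h5 : ∀ j ∈ PySem.List.pyRange 0 priorities.length 1,
      PySem.List.pyGetD priorities j 0 ∈
        PySem.List.sorted (PySem.Set.ofList priorities) (fun x => x) true := by
    intro j hj
    obtain ⟨h0, h1⟩ := hrange j hj
    rw [PySem.List.mem_sorted, PySem.Set.mem_ofList,
      PySem.List.pyGetD_eq_getElem priorities 0 h0 h1]
    exact List.getElem_mem _
  cases hL : PySem.List.sorted (PySem.Set.ofList priorities) (fun x => x) true with
  | nil =>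
    have := mainLoop priorities location
      ((PySem.List.pyRange 0 priorities.length 1).length + 0)
      (PySem.List.pyRange 0 priorities.length 1) [] [] 0 0 priorities
      ((priorities.length + 1) * (priorities.length + 1))
      (by simp) hpw hrange hperm (by simp) (by rw [hL] at h5; exact h5) trivial
      (by rw [hlen])
    rw [hrot] at this
    rw [this]
    rfl
  | cons p rest =>
    rw [runLevels_eq_cont]
    have hgd : (buildGroups priorities).getD p [] =
        grp priorities (PySem.List.pyRange 0 priorities.length 1) p := by
      rw [getD_buildGroups]; rfl
    rw [hgd]
    have := mainLoop priorities location
      ((PySem.List.pyRange 0 priorities.length 1).length + (p :: rest).length)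
      (PySem.List.pyRange 0 priorities.length 1) (p :: rest)
      (rotQ (grp priorities (PySem.List.pyRange 0 priorities.length 1) p) 0) 0 0 priorities
      ((priorities.length + 1) * (priorities.length + 1))
      (by omega) hpw hrange hperm (by rw [hL] at hlev; exact hlev)
      (by rw [hL] at h5; exact h5)
      ⟨rfl, fun j h0 h1 _ => PySem.List.mem_pyRange_one.mpr ⟨h0, h1⟩⟩
      (by rw [hlen])
    rw [hrot] at this
    exact this

-- ===== VERDICT (by name: the statement is the Claim_ definition above) =====
theorem solution_spec : Claim_equal_solution := by
  intro priorities location _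
  unfold Spec_solution
  exact solution_eq_alt priorities location
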